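-- pv_equiv track=rewrite | github.com/VivekVardhanArrabelli/catalytic-earth | src/catalytic_earth/geometry_retrieval.py | _residue_has_any_role
-- ===== SOURCE A (Python) =====
-- from typing import Any, Callable
--
-- def _normalize_phrase(value: str) -> str:
--     return value.lower().replace("_", " ").replace("-", " ").strip()
--
-- def _residue_has_any_role(residue: dict[str, Any], required_roles: set[str]) -> bool:
--     roles = {_normalize_phrase(role) for role in residue.get("roles", []) if isinstance(role, str)}
--     if any(required in roles for required in required_roles):
--         return True
--     for role in roles:
--         if role == "covalent catalysis" and required_roles & {"nucleophile", "covalently attached"}: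
--             return True
--         if (
--             role in {"proton shuttle (general acid/base)", "proton shuttle general acid/base"}
--             and required_roles
--             & {"acid base", "general base", "proton acceptor", "proton donor", "proton relay"}
--         ):
--             return True
--         if role == "modifies pka" and required_roles & {"acid", "acid base", "proton acceptor", "proton donor"}:
--             return True
--     return False
-- ===== SOURCE B (Python) =====
-- _IMPLIED_BY = {
--     "nucleophile": ("covalent catalysis",),
--     "covalently attached": ("covalent catalysis",),
--     "acid base": ("proton shuttle (general acid/base)", "proton shuttle general acid/base", "modifies pka"),
--     "general base": ("proton shuttle (general acid/base)", "proton shuttle general acid/base"),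
--     "proton acceptor": ("proton shuttle (general acid/base)", "proton shuttle general acid/base", "modifies pka"),
--     "proton donor": ("proton shuttle (general acid/base)", "proton shuttle general acid/base", "modifies pka"),
--     "proton relay": ("proton shuttle (general acid/base)", "proton shuttle general acid/base"),
--     "acid": ("modifies pka",),
-- }
--
--
-- def _normalize_phrase(value: str) -> str:
--     return value.lower().replace("_", " ").replace("-", " ").strip()
--
--
-- def _residue_has_any_role(residue, required_roles):
--     roles = {_normalize_phrase(role) for role in residue.get("roles", []) if isinstance(role, str)}
--     for req in required_roles:
--         if req in roles or any(p in roles for p in _IMPLIED_BY.get(req, ())):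
--             return True
--     return False
-- ===== Notes on version B (the rewrite author's own statement) =====
-- stated objective: alternative
-- what changed: Replaces the roles-to-requirements scan with its three hard-coded synonym branches by a reverse-index table _IMPLIED_BY mapping each required keyword to the role phrases that satisfy it, and loops over required_roles checking the keyword itself or any implied phrase against the normalized role set.
import Mathlib
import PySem

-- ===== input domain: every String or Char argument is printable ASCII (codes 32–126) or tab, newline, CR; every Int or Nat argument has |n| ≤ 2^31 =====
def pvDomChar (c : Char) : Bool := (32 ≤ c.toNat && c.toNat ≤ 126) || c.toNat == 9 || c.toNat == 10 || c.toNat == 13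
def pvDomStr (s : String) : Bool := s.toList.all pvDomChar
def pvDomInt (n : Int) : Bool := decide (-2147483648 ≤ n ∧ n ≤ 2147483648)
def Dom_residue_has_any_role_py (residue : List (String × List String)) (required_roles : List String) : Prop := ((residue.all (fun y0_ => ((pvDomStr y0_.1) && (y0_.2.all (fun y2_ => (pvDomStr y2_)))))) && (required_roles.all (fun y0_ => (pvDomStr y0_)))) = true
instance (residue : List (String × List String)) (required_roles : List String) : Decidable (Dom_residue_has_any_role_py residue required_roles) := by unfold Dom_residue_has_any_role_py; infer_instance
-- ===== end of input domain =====

-- B replaces A's roles-to-requirements scan with its three hard-coded synonym branches by a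
-- reverse-index table from each required keyword to the role phrases satisfying it ('alternative').

-- ===== PORT A =====
def pvNormalize (v : String) : String :=
  PySem.Str.strip (PySem.Str.replace (PySem.Str.replace (PySem.Str.lower v) "_" " ") "-" " ")

-- on the typed input domain (dict[str, list[str]]) A's isinstance(role, str) test is always true
def residue_has_any_role_py (residue : List (String × List String)) (required_roles : List String) : Bool :=
  let roles : PySem.Set String :=
    PySem.Set.ofList (((PySem.Dict.mk residue).getD "roles" []).map pvNormalize)
  if required_roles.any (fun required => roles.contains required) then true
  else
    roles.any (fun role =>
      (role == "covalent catalysis" &&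
        required_roles.any (fun q => q == "nucleophile" || q == "covalently attached")) ||
      ((role == "proton shuttle (general acid/base)" || role == "proton shuttle general acid/base") &&
        required_roles.any (fun q => q == "acid base" || q == "general base" || q == "proton acceptor" || q == "proton donor" || q == "proton relay")) ||
      (role == "modifies pka" &&
        required_roles.any (fun q => q == "acid" || q == "acid base" || q == "proton acceptor" || q == "proton donor")))

-- ===== PORT B =====
def pvImpliedBy : PySem.Dict String (List String) := PySem.Dict.mk
  [("nucleophile", ["covalent catalysis"]),
   ("covalently attached", ["covalent catalysis"]),
   ("acid base", ["proton shuttle (general acid/base)", "proton shuttle general acid/base", "modifies pka"]),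
   ("general base", ["proton shuttle (general acid/base)", "proton shuttle general acid/base"]),
   ("proton acceptor", ["proton shuttle (general acid/base)", "proton shuttle general acid/base", "modifies pka"]),
   ("proton donor", ["proton shuttle (general acid/base)", "proton shuttle general acid/base", "modifies pka"]),
   ("proton relay", ["proton shuttle (general acid/base)", "proton shuttle general acid/base"]),
   ("acid", ["modifies pka"])]

def residue_has_any_role_py_alt (residue : List (String × List String)) (required_roles : List String) : Bool :=
  let roles : PySem.Set String :=
    PySem.Set.ofList (((PySem.Dict.mk residue).getD "roles" []).map pvNormalize)
  required_roles.any (fun req =>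
    roles.contains req || (pvImpliedBy.getD req []).any (fun p => roles.contains p))

-- ===== PRECONDITION & SPEC =====
def Spec_residue_has_any_role_py (residue : List (String × List String)) (required_roles : List String) (out : Bool) : Prop := out = residue_has_any_role_py_alt residue required_roles
instance (residue : List (String × List String)) (required_roles : List String) (out : Bool) : Decidable (Spec_residue_has_any_role_py residue required_roles out) := by unfold Spec_residue_has_any_role_py; infer_instance

-- ===== CLAIM (what is proved, stated in full; the proofs are below) =====
def Claim_equal_residue_has_any_role_py : Prop := ∀ (residue : List (String × List String)) (required_roles : List String), Dom_residue_has_any_role_py residue required_roles → Spec_residue_has_any_role_py residue required_roles (residue_has_any_role_py residue required_roles)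

-- ===== LEMMAS AND PROOFS =====

lemma mem_impliedBy_iff (p q : String) :
    p ∈ pvImpliedBy.getD q ([] : List String) ↔
      ((p = "covalent catalysis") ∧ (q = "nucleophile" ∨ q = "covalently attached")) ∨
      ((p = "proton shuttle (general acid/base)" ∨ p = "proton shuttle general acid/base") ∧
        (q = "acid base" ∨ q = "general base" ∨ q = "proton acceptor" ∨ q = "proton donor" ∨ q = "proton relay")) ∨
      ((p = "modifies pka") ∧ (q = "acid" ∨ q = "acid base" ∨ q = "proton acceptor" ∨ q = "proton donor")) := by
  by_cases h1 : q = "nucleophile"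
  · subst h1; simp [pvImpliedBy, PySem.Dict.getD_eq_get?_getD, PySem.Dict.get?_mk_cons]
  by_cases h2 : q = "covalently attached"
  · subst h2; simp [pvImpliedBy, PySem.Dict.getD_eq_get?_getD, PySem.Dict.get?_mk_cons]
  by_cases h3 : q = "acid base"
  · subst h3; simp [pvImpliedBy, PySem.Dict.getD_eq_get?_getD, PySem.Dict.get?_mk_cons]; tauto
  by_cases h4 : q = "general base"
  · subst h4; simp [pvImpliedBy, PySem.Dict.getD_eq_get?_getD, PySem.Dict.get?_mk_cons]
  by_cases h5 : q = "proton acceptor"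
  · subst h5; simp [pvImpliedBy, PySem.Dict.getD_eq_get?_getD, PySem.Dict.get?_mk_cons]; tauto
  by_cases h6 : q = "proton donor"
  · subst h6; simp [pvImpliedBy, PySem.Dict.getD_eq_get?_getD, PySem.Dict.get?_mk_cons]; tauto
  by_cases h7 : q = "proton relay"
  · subst h7; simp [pvImpliedBy, PySem.Dict.getD_eq_get?_getD, PySem.Dict.get?_mk_cons]
  by_cases h8 : q = "acid"
  · subst h8; simp [pvImpliedBy, PySem.Dict.getD_eq_get?_getD, PySem.Dict.get?_mk_cons]
  · simp [pvImpliedBy, PySem.Dict.getD_eq_get?_getD, beq_iff_eq,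
      PySem.Dict.get?,
      Ne.symm h1, Ne.symm h2, Ne.symm h3, Ne.symm h4, Ne.symm h5, Ne.symm h6, Ne.symm h7, Ne.symm h8,
      h1, h2, h3, h4, h5, h6, h7, h8]

lemma pv_main (R req : List String) :
    (if req.any (fun q => R.contains q) then true
     else
       R.any (fun role =>
        (role == "covalent catalysis" &&
          req.any (fun q => q == "nucleophile" || q == "covalently attached")) ||
        ((role == "proton shuttle (general acid/base)" || role == "proton shuttle general acid/base") &&
          req.any (fun q => q == "acid base" || q == "general base" || q == "proton acceptor" || q == "proton donor" || q == "proton relay")) ||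
        (role == "modifies pka" &&
          req.any (fun q => q == "acid" || q == "acid base" || q == "proton acceptor" || q == "proton donor")))) =
    req.any (fun q => R.contains q || (pvImpliedBy.getD q []).any (fun p => R.contains p)) := by
  by_cases hc : req.any (fun q => R.contains q) = true
  · rw [if_pos hc]
    symm
    rcases List.any_eq_true.mp hc with ⟨q, hq, hcq⟩
    exact List.any_eq_true.mpr ⟨q, hq, by rw [hcq, Bool.true_or]⟩
  · rw [if_neg hc, Bool.eq_iff_iff]
    simp only [List.any_eq_true, Bool.or_eq_true, Bool.and_eq_true, beq_iff_eq,
      List.contains_iff_mem, mem_impliedBy_iff] at hc ⊢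
    push Not at hc
    constructor
    · rintro ⟨role, hrole, (⟨hcc, q, hq, hk⟩ | ⟨hps, q, hq, hk⟩) | ⟨hmp, q, hq, hk⟩⟩
      · exact ⟨q, hq, Or.inr ⟨role, Or.inl ⟨hcc, by tauto⟩, hrole⟩⟩
      · exact ⟨q, hq, Or.inr ⟨role, Or.inr (Or.inl ⟨hps, by tauto⟩), hrole⟩⟩
      · exact ⟨q, hq, Or.inr ⟨role, Or.inr (Or.inr ⟨hmp, by tauto⟩), hrole⟩⟩
    · rintro ⟨q, hq, hmem | ⟨p, ⟨hp, hk⟩ | ⟨hp, hk⟩ | ⟨hp, hk⟩, hpR⟩⟩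
      · exact absurd hmem (hc q hq)
      · exact ⟨p, hpR, Or.inl (Or.inl ⟨hp, q, hq, by tauto⟩)⟩
      · exact ⟨p, hpR, Or.inl (Or.inr ⟨hp, q, hq, by tauto⟩)⟩
      · exact ⟨p, hpR, Or.inr ⟨hp, q, hq, by tauto⟩⟩

-- ===== VERDICT (by name: the statement is the Claim_ definition above) =====
theorem residue_has_any_role_py_spec : Claim_equal_residue_has_any_role_py := by
  intro residue required_roles _
  unfold Spec_residue_has_any_role_py residue_has_any_role_py residue_has_any_role_py_alt
  exact pv_main _ _
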